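-- pv_equiv track=rewrite | github.com/sean-smith/interview_prep | interview.py | anyP
-- ===== SOURCE A (Python) =====
-- def anyP(s,r,l):
-- 	if r == 1:
-- 		if s<0 or s>=len(l):
-- 			return 0
-- 		else:
-- 			return l[s]
-- 	elif r > 1:
-- 		sum = 0
-- 		for i in range(len(l)):
-- 			if l[i] > 0:
-- 				sum += anyP(s-i, r-1, l)*l[i]
-- 		return sum
-- ===== SOURCE B (Python) =====
-- def anyP(s, r, l):
--     if r < 1:
--         return None
--     if s < 0:
--         return 0
--     cap = s + 1
--     g = l[:cap]                       # base polynomial L truncated to degree s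
--     for _ in range(r - 1):            # multiply by the positive-weight polynomial W, r-1 times
--         g = _cmul(l, g, cap)
--         if not g:
--             break
--     return g[s] if s < len(g) else 0
--
--
-- def _cmul(l, g, cap):
--     # truncated convolution: out[k] = sum of l[i]*g[k-i] over positive l[i], k < cap,
--     # with trailing zeros removed
--     if not g:
--         return []
--     out = [0] * min(len(l) + len(g) - 1, cap)
--     for i in range(len(l)):
--         if l[i] > 0:
--             for j in range(len(g)):
--                 if i + j >= cap:
--                     break
--                 out[i + j] += l[i] * g[j]
--     while out and out[-1] == 0:
--         out.pop()
--     return out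
-- ===== Notes on version B (the rewrite author's own statement) =====
-- stated objective: alternative
-- what changed: Replaces A's exponential tree recursion with iterated truncated polynomial convolution: the answer is the x^s coefficient of W(x)^(r-1)*L(x) (W = positive entries of l), built level by level with one convolution per level and an early exit when the polynomial vanishes, so each level is computed once instead of once per call path.
-- outside the precondition, e.g. on anyP(0, 0, [1, 2]): A returns None, B returns None; on anyP(0, 950, [1]): A returns 1, B returns 1
import Mathlib
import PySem

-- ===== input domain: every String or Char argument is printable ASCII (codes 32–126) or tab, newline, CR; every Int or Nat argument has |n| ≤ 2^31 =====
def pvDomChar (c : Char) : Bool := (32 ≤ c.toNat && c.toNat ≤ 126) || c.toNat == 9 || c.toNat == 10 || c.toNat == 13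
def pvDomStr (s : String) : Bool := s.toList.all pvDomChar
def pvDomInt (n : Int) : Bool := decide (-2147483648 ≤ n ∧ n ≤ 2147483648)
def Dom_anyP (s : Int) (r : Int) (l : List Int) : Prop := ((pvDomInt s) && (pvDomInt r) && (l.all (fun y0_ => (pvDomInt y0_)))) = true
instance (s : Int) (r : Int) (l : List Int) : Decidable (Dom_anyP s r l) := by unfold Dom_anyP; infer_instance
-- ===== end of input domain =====

-- B replaces A's exponential tree recursion by iterated truncated polynomial convolution:
-- the answer is the x^s coefficient of W(x)^(r-1)·L(x) (W = positive entries of l), built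
-- bottom-up with one convolution per level and early exit when the polynomial vanishes
-- (objective: alternative algorithm; each level is computed once).


-- ===== PORT A =====
-- literal port of A; `l[s]` / `l[i]` are in range where used, so List.getD is exact there
def anyP (s : Int) (r : Int) (l : List Int) : Int :=
  if r == 1 then
    if s < 0 ∨ s ≥ (l.length : Int) then 0 else l.getD s.toNat 0
  else if r > 1 then
    (List.range l.length).foldl
      (fun sum i =>
        if l.getD i 0 > 0 then sum + anyP (s - i) (r - 1) l * l.getD i 0 else sum) 0
  else 0  -- Python falls through and returns None here; excluded by Pre_anyP
termination_by r.toNat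
decreasing_by simp only [beq_iff_eq] at *; omega

-- ===== PORT B =====
-- `while out and out[-1] == 0: out.pop()` — strip trailing zeros
def pvTrim : List Int → List Int
  | [] => []
  | x :: xs =>
    match pvTrim xs with
    | [] => if x == 0 then [] else [x]
    | ys => x :: ys

-- _cmul: truncated convolution; the inner `break` at i+j >= cap is rendered as the
-- range bound min g.length (cap - i) — exactly the iterations the Python loop performs
def pvCmul (l g : List Int) (cap : Nat) : List Int :=
  if g = [] then []
  else
    pvTrim ((List.range l.length).foldl
      (fun out i =>
        if l.getD i 0 > 0 then
          (List.range (min g.length (cap - i))).foldl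
            (fun o j => o.set (i + j) (o.getD (i + j) 0 + l.getD i 0 * g.getD j 0)) out
        else out)
      (List.replicate (min (l.length + g.length - 1) cap) (0 : Int)))

-- the `for _ in range(r-1)` loop with its early `break` on the zero polynomial
def pvLoop (l : List Int) (cap : Nat) : Nat → List Int → List Int
  | 0, g => g
  | fuel + 1, g =>
    let g' := pvCmul l g cap
    if g' = [] then g' else pvLoop l cap fuel g'

def anyP_alt (s : Int) (r : Int) (l : List Int) : Int :=
  if r < 1 then 0  -- Python returns None here; excluded by Pre_anyP
  else if s < 0 then 0
  else
    let cap := s.toNat + 1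
    let g := pvLoop l cap (r - 1).toNat (l.take cap)
    if s.toNat < g.length then g.getD s.toNat 0 else 0

-- ===== PRECONDITION & SPEC =====
-- Pre_ excludes r < 1, where Python A falls through and returns None (no int), and r > 900
-- when l contains a positive entry, where A's recursion of depth r overruns Python's
-- recursion limit (RecursionError at r ≈ 997; the margin covers interpreter variation) or
-- its exponential call tree never returns; for all-nonpositive l no recursion happens and
-- every r ≥ 1 stays inside Pre_.
def Pre_anyP (s : Int) (r : Int) (l : List Int) : Prop :=
  1 ≤ r ∧ (r ≤ 900 ∨ ∀ x ∈ l, x ≤ 0)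
instance (s : Int) (r : Int) (l : List Int) : Decidable (Pre_anyP s r l) := by unfold Pre_anyP; infer_instance
def pvWitness_anyP : Int × Int × List Int := (1, 2, [3, 1])

def Spec_anyP (s : Int) (r : Int) (l : List Int) (out : Int) : Prop := out = anyP_alt s r l
instance (s : Int) (r : Int) (l : List Int) (out : Int) : Decidable (Spec_anyP s r l out) := by unfold Spec_anyP; infer_instance

-- ===== CLAIM (what is proved, stated in full; the proofs are below) =====
def Claim_equal_anyP : Prop := ∀ (s : Int) (r : Int) (l : List Int), Dom_anyP s r l → Pre_anyP s r l → Spec_anyP s r l (anyP s r l)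

-- ===== LEMMAS AND PROOFS =====

-- the mathematical recurrence both programs compute: fAux l j t = anyP t (j+1) l
def fAux (l : List Int) : Nat → Int → Int
  | 0, t => if 0 ≤ t ∧ t < (l.length : Int) then l.getD t.toNat 0 else 0
  | j + 1, t =>
    (List.range l.length).foldl
      (fun acc i => acc + (if l.getD i 0 > 0 then l.getD i 0 else 0) * fAux l j (t - i)) 0

theorem anyP_eq_fAux (l : List Int) : ∀ (j : Nat) (s : Int), anyP s ((j : Int) + 1) l = fAux l j s := by
  intro j
  induction j with
  | zero =>
    intro s
    rw [anyP, fAux]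
    norm_num
    split_ifs with h1 h2 <;> omega
  | succ j ih =>
    intro s
    rw [anyP, fAux]
    push_cast
    have h1 : (((j : Int) + 1 + 1) == 1) = false := by simp; omega
    have h2 : ((j : Int) + 1 + 1) > 1 := by omega
    rw [h1, if_neg (by simp), if_pos h2]
    refine PySem.List.foldl_congr_mem _ _ _ _ ?_
    intro acc i _
    have he : (j : Int) + 1 + 1 - 1 = (j : Int) + 1 := by ring
    rw [he, ih (s - i)]
    split_ifs with h
    · ring
    · ring

-- f vanishes on negative arguments: every contribution traces back to the base row on [0, n)
theorem fAux_neg (l : List Int) : ∀ (j : Nat) (t : Int), t < 0 → fAux l j t = 0 := by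
  intro j
  induction j with
  | zero => intro t ht; rw [fAux, if_neg (by omega)]
  | succ j ih =>
    intro t ht
    rw [fAux]
    have hcg : ∀ (acc : Int), ∀ i ∈ List.range l.length,
        (fun (acc : Int) (i : Nat) => acc + (if l.getD i 0 > 0 then l.getD i 0 else 0) * fAux l j (t - (i : Int))) acc i
          = (fun (acc : Int) (_ : Nat) => acc + (fun (_ : Nat) => (0 : Int)) i) acc i := by
      intro acc i _
      simp only
      rw [ih (t - (i : Int)) (by omega), mul_zero]
    rw [PySem.List.foldl_congr_mem _ _ _ _ hcg, PySem.List.foldl_add]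
    simp only [List.map_const', List.sum_replicate, smul_zero, add_zero]

-- if a level is zero on [0, s], all later levels are zero on [0, s]
theorem fAux_zero_propagate (l : List Int) (S : Nat)
    (j : Nat) (h : ∀ t : Nat, t ≤ S → fAux l j (t : Int) = 0) :
    ∀ (m : Nat) (t : Nat), t ≤ S → fAux l (j + m) (t : Int) = 0 := by
  intro m
  induction m with
  | zero => exact h
  | succ m ih =>
    intro t ht
    have : j + (m + 1) = (j + m) + 1 := by omega
    rw [this, fAux]
    have hcg : ∀ (acc : Int), ∀ i ∈ List.range l.length,
        (fun (acc : Int) (i : Nat) => acc + (if l.getD i 0 > 0 then l.getD i 0 else 0) * fAux l (j + m) ((t : Int) - (i : Int))) acc i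
          = (fun (acc : Int) (_ : Nat) => acc + (fun (_ : Nat) => (0 : Int)) i) acc i := by
      intro acc i _
      simp only
      by_cases hit : i ≤ t
      · have : (t : Int) - (i : Int) = ((t - i : Nat) : Int) := by omega
        rw [this, ih (t - i) (by omega), mul_zero]
      · rw [fAux_neg l (j + m) _ (by omega), mul_zero]
    rw [PySem.List.foldl_congr_mem _ _ _ _ hcg, PySem.List.foldl_add]
    simp only [List.map_const', List.sum_replicate, smul_zero, add_zero]

theorem pvTrim_getD (g : List Int) : ∀ k : Nat, (pvTrim g).getD k 0 = g.getD k 0 := by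
  induction g with
  | nil => intro k; rfl
  | cons x xs ih =>
    intro k
    rw [pvTrim]
    cases hys : pvTrim xs with
    | nil =>
      by_cases hx : x = 0
      · simp only [hx, beq_self_eq_true, if_pos]
        cases k with
        | zero => simp
        | succ k => have := ih k; rw [hys] at this; simpa using this
      · rw [if_neg (by simpa using hx)]
        cases k with
        | zero => simp
        | succ k => have := ih k; rw [hys] at this; simpa using this
    | cons y ys =>
      cases k with
      | zero => simp
      | succ k => have := ih k; rw [hys] at this; simpa using this

-- inner loop: length is preserved and entry k gains exactly the i-contribution
theorem inner_loop_spec (v : Int) (g : List Int) (i : Nat) (m : Nat) (out : List Int)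
    (hm : m = 0 ∨ i + m ≤ out.length) :
    (((List.range m).foldl
        (fun o j => o.set (i + j) (o.getD (i + j) 0 + v * g.getD j 0)) out).length = out.length)
    ∧ ∀ k : Nat,
      ((List.range m).foldl
        (fun o j => o.set (i + j) (o.getD (i + j) 0 + v * g.getD j 0)) out).getD k 0
        = out.getD k 0 + (if i ≤ k ∧ k - i < m then v * g.getD (k - i) 0 else 0) := by
  induction m generalizing out with
  | zero =>
    refine ⟨rfl, ?_⟩
    intro k
    simp only [List.range_zero, List.foldl_nil]
    rw [if_neg (by omega), add_zero]
  | succ m ih =>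
    have hmr : i + (m + 1) ≤ out.length := by rcases hm with h | h <;> omega
    obtain ⟨ihlen, ihgetD⟩ := ih out (Or.inr (by omega))
    rw [List.range_succ, List.foldl_append, List.foldl_cons, List.foldl_nil]
    set q := (List.range m).foldl
        (fun o j => o.set (i + j) (o.getD (i + j) 0 + v * g.getD j 0)) out with hq
    constructor
    · rw [List.length_set, ihlen]
    · intro k
      by_cases hk : k = i + m
      · subst hk
        rw [List.getD_eq_getElem?_getD, List.getElem?_set_self (by omega), Option.getD_some]
        rw [ihgetD (i + m), if_neg (by omega), add_zero]
        have hmi : i + m - i = m := by omega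
        rw [hmi, if_pos (by omega)]
      · rw [List.getD_eq_getElem?_getD, List.getElem?_set_ne (by omega), ← List.getD_eq_getElem?_getD]
        rw [ihgetD k]
        by_cases hik : i ≤ k ∧ k - i < m
        · rw [if_pos hik, if_pos (by omega)]
        · rw [if_neg hik, if_neg (by omega)]

-- outer loop: entry k of the accumulation array is the convolution sum over processed i
theorem outer_loop_spec (l g : List Int) (cap : Nat) (k : Nat) (hg : g ≠ []) (hk : k < cap) :
    ∀ (n : Nat) (out : List Int), n ≤ l.length → out.length = min (l.length + g.length - 1) cap →
    (((List.range n).foldl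
        (fun out i =>
          if l.getD i 0 > 0 then
            (List.range (min g.length (cap - i))).foldl
              (fun o j => o.set (i + j) (o.getD (i + j) 0 + l.getD i 0 * g.getD j 0)) out
          else out) out).length = out.length)
    ∧ (((List.range n).foldl
        (fun out i =>
          if l.getD i 0 > 0 then
            (List.range (min g.length (cap - i))).foldl
              (fun o j => o.set (i + j) (o.getD (i + j) 0 + l.getD i 0 * g.getD j 0)) out
          else out) out).getD k 0
        = out.getD k 0 + (List.range n).foldl
            (fun acc i => acc + (if l.getD i 0 > 0 ∧ i ≤ k then l.getD i 0 * g.getD (k - i) 0 else 0)) 0) := by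
  intro n
  induction n with
  | zero =>
    intro out _ _
    exact ⟨rfl, by simp⟩
  | succ n ih =>
    intro out hn hlen
    obtain ⟨ihlen, ihgetD⟩ := ih out (by omega) hlen
    simp only [List.range_succ, List.foldl_append, List.foldl_cons, List.foldl_nil]
    set q := (List.range n).foldl
        (fun out i =>
          if l.getD i 0 > 0 then
            (List.range (min g.length (cap - i))).foldl
              (fun o j => o.set (i + j) (o.getD (i + j) 0 + l.getD i 0 * g.getD j 0)) out
          else out) out with hqdef
    by_cases hpos : l.getD n 0 > 0
    · rw [if_pos hpos]
      have hglen1 : 1 ≤ g.length := by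
        cases g with
        | nil => exact absurd rfl hg
        | cons a as => simp
      have hbound : min g.length (cap - n) = 0 ∨ n + min g.length (cap - n) ≤ q.length := by
        rw [ihlen, hlen]
        by_cases hcn : cap ≤ n
        · left; omega
        · right; omega
      obtain ⟨slen, sgetD⟩ := inner_loop_spec (l.getD n 0) g n (min g.length (cap - n)) q hbound
      constructor
      · rw [slen, ihlen]
      · rw [sgetD k, ihgetD]
        have : (if l.getD n 0 > 0 ∧ n ≤ k then l.getD n 0 * g.getD (k - n) 0 else 0)
            = (if n ≤ k ∧ k - n < min g.length (cap - n) then l.getD n 0 * g.getD (k - n) 0 else 0) := by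
          by_cases h2 : n ≤ k ∧ k - n < min g.length (cap - n)
          · rw [if_pos h2, if_pos ⟨hpos, h2.1⟩]
          · rw [if_neg h2]
            by_cases hnk : n ≤ k
            · rw [if_pos ⟨hpos, hnk⟩]
              have hglek : g.length ≤ k - n := by
                rcases Nat.le_total g.length (cap - n) with hmg | hmg
                · have hmeq : min g.length (cap - n) = g.length := Nat.min_eq_left hmg
                  omega
                · have hmeq : min g.length (cap - n) = cap - n := Nat.min_eq_right hmg
                  omega
              have hg0 : g.getD (k - n) 0 = 0 := by
                rw [List.getD_eq_getElem?_getD, List.getElem?_eq_none hglek]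
                rfl
              rw [hg0, mul_zero]
            · rw [if_neg (by tauto)]
        rw [this]
        ring
    · rw [if_neg hpos]
      refine ⟨ihlen, ?_⟩
      rw [ihgetD, if_neg (by tauto), add_zero]

-- entry k < cap of pvCmul is the truncated convolution coefficient
theorem pvCmul_getD (l g : List Int) (cap : Nat) (k : Nat) (hk : k < cap) :
    (pvCmul l g cap).getD k 0
      = (List.range l.length).foldl
          (fun acc i => acc + (if l.getD i 0 > 0 ∧ i ≤ k then l.getD i 0 * g.getD (k - i) 0 else 0)) 0 := by
  by_cases hg : g = []
  · subst hg
    rw [pvCmul, if_pos rfl]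
    have hcg : ∀ (acc : Int), ∀ i ∈ List.range l.length,
        (fun (acc : Int) (i : Nat) => acc + (if l.getD i 0 > 0 ∧ i ≤ k then l.getD i 0 * List.getD [] (k - i) 0 else 0)) acc i
          = (fun (acc : Int) (_ : Nat) => acc + (fun (_ : Nat) => (0 : Int)) i) acc i := by
      intro acc i _
      simp
    rw [PySem.List.foldl_congr_mem _ _ _ _ hcg, PySem.List.foldl_add]
    simp only [List.map_const', List.sum_replicate, smul_zero, add_zero]
    rfl
  · rw [pvCmul, if_neg hg]
    rw [pvTrim_getD]
    set out0 := List.replicate (min (l.length + g.length - 1) cap) (0 : Int) with hout0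
    have hlen0 : out0.length = min (l.length + g.length - 1) cap := by simp [hout0]
    obtain ⟨flen, fgetD⟩ := outer_loop_spec l g cap k hg hk l.length out0 (le_refl _) hlen0
    rw [fgetD]
    have hz : out0.getD k 0 = 0 := by
      rw [hout0, List.getD_eq_getElem?_getD, List.getElem?_replicate]
      split_ifs <;> rfl
    rw [hz, zero_add]

-- one convolution step advances the level invariant by one
theorem step_invariant (l g : List Int) (S : Nat) (j : Nat)
    (h : ∀ t : Nat, t ≤ S → g.getD t 0 = fAux l j (t : Int)) :
    ∀ t : Nat, t ≤ S → (pvCmul l g (S + 1)).getD t 0 = fAux l (j + 1) (t : Int) := by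
  intro t ht
  rw [pvCmul_getD l g (S + 1) t (by omega), fAux]
  refine PySem.List.foldl_congr_mem _ _ _ _ ?_
  intro acc i _
  by_cases hpos : l.getD i 0 > 0
  · by_cases hit : i ≤ t
    · rw [if_pos ⟨hpos, hit⟩, if_pos hpos]
      have h1 : (t : Int) - (i : Int) = ((t - i : Nat) : Int) := by omega
      rw [h1, ← h (t - i) (by omega)]
    · rw [if_neg (by tauto), if_pos hpos, fAux_neg l j _ (by omega), mul_zero]
  · rw [if_neg (by tauto), if_neg hpos, zero_mul]

-- the loop with early exit computes level j + fuel on [0, S]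
theorem pvLoop_invariant (l : List Int) (S : Nat) :
    ∀ (fuel : Nat) (g : List Int) (j : Nat),
    (∀ t : Nat, t ≤ S → g.getD t 0 = fAux l j (t : Int)) →
    ∀ t : Nat, t ≤ S → (pvLoop l (S + 1) fuel g).getD t 0 = fAux l (j + fuel) (t : Int) := by
  intro fuel
  induction fuel with
  | zero => intro g j h t ht; rw [pvLoop]; exact h t ht
  | succ fuel ih =>
    intro g j h t ht
    rw [pvLoop]
    have hstep := step_invariant l g S j h
    by_cases hnil : pvCmul l g (S + 1) = []
    · rw [if_pos hnil]
      have hzero : ∀ t : Nat, t ≤ S → fAux l (j + 1) (t : Int) = 0 := by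
        intro t' ht'
        rw [← hstep t' ht', hnil]
        rfl
      have := fAux_zero_propagate l S (j + 1) hzero fuel t ht
      have harith : j + 1 + fuel = j + (fuel + 1) := by omega
      rw [harith] at this
      rw [this, hnil]
      rfl
    · rw [if_neg hnil]
      have harith : j + (fuel + 1) = (j + 1) + fuel := by omega
      rw [harith]
      exact ih (pvCmul l g (S + 1)) (j + 1) hstep t ht

-- ===== VERDICT (by name: the statement is the Claim_ definition above) =====
theorem anyP_spec : Claim_equal_anyP := by
  intro s r l _ hpre
  unfold Spec_anyP Pre_anyP at *
  obtain ⟨hpre1, -⟩ := hpre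
  set j : Nat := (r - 1).toNat with hj
  have hr : r = (j : Int) + 1 := by omega
  rw [hr, anyP_eq_fAux, anyP_alt]
  rw [if_neg (by omega)]
  by_cases hs : s < 0
  · rw [if_pos hs]
    exact fAux_neg l j s hs
  · rw [if_neg hs]
    simp only
    have hs0 : 0 ≤ s := by omega
    set S : Nat := s.toNat with hS
    have hscast : s = (S : Int) := by omega
    have hbase : ∀ t : Nat, t ≤ S → (l.take (S + 1)).getD t 0 = fAux l 0 (t : Int) := by
      intro t ht
      rw [fAux]
      have hget : (l.take (S + 1)).getD t 0 = l.getD t 0 := by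
        rw [List.getD_eq_getElem?_getD, List.getD_eq_getElem?_getD, List.getElem?_take_of_lt (show t < S + 1 by omega)]
      rw [hget]
      by_cases hin : (t : Int) < (l.length : Int)
      · rw [if_pos ⟨by omega, hin⟩]
        simp
      · rw [if_neg (by omega), List.getD_eq_getElem?_getD, List.getElem?_eq_none (by omega)]
        rfl
    have hjt : ((j : Int) + 1 - 1).toNat = j := by omega
    have hinv := pvLoop_invariant l S j (l.take (S + 1)) 0 hbase S (le_refl S)
    rw [zero_add] at hinv
    rw [hjt]
    set gf := pvLoop l (S + 1) j (l.take (S + 1)) with hgf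
    by_cases hlt : S < gf.length
    · rw [if_pos hlt, hinv, hscast]
    · rw [if_neg hlt]
      rw [hscast, ← hinv, List.getD_eq_getElem?_getD, List.getElem?_eq_none (by omega)]
      rfl
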